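-- pv_equiv track=rewrite | github.com/whdrjs2626/Gungorithm | Python/programmers/level0/홀수vs짝수.py | solution
-- ===== SOURCE A (Python) =====
-- def solution(num_list):
--     odd_sum, even_sum = 0, 0
--     for i in range(1, len(num_list) + 1):
--         if i % 2 == 0:
--             even_sum += num_list[i - 1]
--         else:
--             odd_sum += num_list[i - 1]
--     return max(even_sum, odd_sum)
-- ===== SOURCE B (Python) =====
-- def solution(num_list):
--     # One backward pass: total sum and telescoping alternating sum; then
--     # max(a, b) = (a + b + |a - b|) // 2 as a closed form, no parity branch.
--     total = 0
--     diff = 0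
--     for x in reversed(num_list):
--         total += x
--         diff = x - diff
--     return (total + abs(diff)) // 2
-- ===== Notes on version B (the rewrite author's own statement) =====
-- stated objective: alternative
-- what changed: B drops the index/parity accumulation entirely: a single branch-free backward pass maintains the total sum and the telescoping alternating sum (diff = x - diff), and the answer is recovered by the closed form (total + |diff|) // 2 instead of max over two parity buckets.
import Mathlib
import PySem

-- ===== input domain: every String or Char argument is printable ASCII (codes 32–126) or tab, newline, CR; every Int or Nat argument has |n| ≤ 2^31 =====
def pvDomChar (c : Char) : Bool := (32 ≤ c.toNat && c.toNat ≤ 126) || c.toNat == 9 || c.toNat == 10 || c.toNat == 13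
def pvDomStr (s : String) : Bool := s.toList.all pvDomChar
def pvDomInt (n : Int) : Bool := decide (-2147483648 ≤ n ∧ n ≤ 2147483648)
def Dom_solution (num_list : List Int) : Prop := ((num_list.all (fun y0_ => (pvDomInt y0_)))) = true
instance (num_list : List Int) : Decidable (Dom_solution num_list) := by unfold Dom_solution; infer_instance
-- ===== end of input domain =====

-- B replaces A's parity-branch bucket sums and max by one branch-free backward pass
-- (total sum + telescoping alternating sum) and the closed form (total + |diff|) // 2;
-- objective: alternative.

-- ===== PORT A =====
-- A's loop body: state (odd_sum, even_sum), add num_list[i-1] to the component picked by i's parity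
def aBody (num_list : List Int) (p : Int × Int) (i : Int) : Int × Int :=
  if i % 2 == 0 then (p.1, p.2 + PySem.List.pyGetD num_list (i - 1) 0)
  else (p.1 + PySem.List.pyGetD num_list (i - 1) 0, p.2)

-- literal port of A: fold over range(1, len+1) with state (odd_sum, even_sum)
def solution (num_list : List Int) : Int :=
  let p := (PySem.List.pyRange 1 ((num_list.length : Int) + 1) 1).foldl (aBody num_list) (0, 0)
  max p.2 p.1

-- ===== PORT B =====
-- literal port of B: one fold over the reversed list maintaining (total, diff), then (total + |diff|) // 2
def solution_alt (num_list : List Int) : Int :=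
  let p := num_list.reverse.foldl (fun (q : Int × Int) (x : Int) => (q.1 + x, x - q.2)) (0, 0)
  PySem.Int.floordiv (p.1 + |p.2|) 2

-- ===== PRECONDITION & SPEC =====
def Spec_solution (num_list : List Int) (out : Int) : Prop := out = solution_alt num_list
instance (num_list : List Int) (out : Int) : Decidable (Spec_solution num_list out) := by unfold Spec_solution; infer_instance

-- ===== CLAIM (what is proved, stated in full; the proofs are below) =====
def Claim_equal_solution : Prop := ∀ (num_list : List Int), Dom_solution num_list → Spec_solution num_list (solution num_list)

-- ===== LEMMAS AND PROOFS =====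

-- the pair (odd_sum, even_sum) of A, characterised structurally: consing swaps the buckets
def gPair : List Int → Int × Int
  | [] => (0, 0)
  | x :: xs => (x + (gPair xs).2, (gPair xs).1)

-- the two fold steps for loop indices 1 and 2 on a list starting x, y
theorem aBody_one (x y : Int) (l : List Int) (p : Int × Int) :
    aBody (x :: y :: l) p 1 = (p.1 + x, p.2) := by
  unfold aBody; norm_num

theorem aBody_two (x y : Int) (l : List Int) (p : Int × Int) :
    aBody (x :: y :: l) p 2 = (p.1, p.2 + y) := by
  unfold aBody; norm_num
  rw [show (1:Int) = ((1:Nat):Int) by norm_num, PySem.List.pyGetD_natCast]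
  rfl

-- shifting the loop window by two positions preserves A's loop body
theorem shift_two (x y : Int) (xs : List Int) (init : Int × Int) :
    (PySem.List.pyRange 3 ((xs.length : Int) + 3) 1).foldl (aBody (x :: y :: xs)) init
    = (PySem.List.pyRange 1 ((xs.length : Int) + 1) 1).foldl (aBody xs) init := by
  rw [PySem.List.pyRange_one 3, PySem.List.pyRange_one 1, List.foldl_map, List.foldl_map]
  have hlen : ((xs.length : Int) + 3 - 3).toNat = ((xs.length : Int) + 1 - 1).toNat := by omega
  rw [hlen]
  congr 1
  funext p k
  unfold aBody
  have hmod : ((3 : Int) + k) % 2 = (1 + k) % 2 := by omega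
  have hidx : (3 : Int) + (k : Int) - 1 = ((k + 2 : Nat) : Int) := by omega
  have hidx' : (1 : Int) + (k : Int) - 1 = ((k : Nat) : Int) := by omega
  rw [hmod, hidx, hidx', PySem.List.pyGetD_natCast, PySem.List.pyGetD_natCast]
  simp [List.getD]

-- A's loop computes (o + odd_sum xs, e + even_sum xs)
theorem loop_eq_gPair : (xs : List Int) → (o e : Int) →
    (PySem.List.pyRange 1 ((xs.length : Int) + 1) 1).foldl (aBody xs) (o, e)
    = (o + (gPair xs).1, e + (gPair xs).2)
  | [], o, e => by
      rw [PySem.List.pyRange_one_eq_nil (by simp)]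
      simp [gPair]
  | [x], o, e => by
      have h1 : ((([x] : List Int).length : Int) + 1) = 1 + 1 := by simp
      rw [h1, PySem.List.pyRange_one_singleton]
      simp [gPair]
      unfold aBody; norm_num
  | x :: y :: rest, o, e => by
      have hn : (((x :: y :: rest).length : Int) + 1) = (rest.length : Int) + 3 := by
        simp; omega
      rw [hn, PySem.List.pyRange_one_append 1 3 ((rest.length : Int) + 3) (by omega) (by omega),
        List.foldl_append]
      have h13 : PySem.List.pyRange 1 3 1 = [1, 2] := by decide
      rw [h13]
      simp only [List.foldl_cons, List.foldl_nil, aBody_one, aBody_two]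
      rw [shift_two, loop_eq_gPair rest (o + x) (e + y)]
      simp [gPair]
      constructor <;> ring

-- B's backward fold computes (odd_sum + even_sum, odd_sum - even_sum)
theorem bfold_eq_gPair (xs : List Int) :
    xs.reverse.foldl (fun (q : Int × Int) (x : Int) => (q.1 + x, x - q.2)) (0, 0)
    = ((gPair xs).1 + (gPair xs).2, (gPair xs).1 - (gPair xs).2) := by
  rw [List.foldl_reverse]
  induction xs with
  | nil => simp [gPair]
  | cons x xs ih =>
      simp only [List.foldr_cons, ih, gPair]
      exact Prod.ext (by ring) (by ring)

-- ===== VERDICT (by name: the statement is the Claim_ definition above) =====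
theorem solution_spec : Claim_equal_solution := by
  intro num_list _
  unfold Spec_solution solution solution_alt
  rw [loop_eq_gPair, bfold_eq_gPair]
  simp only [zero_add]
  rw [PySem.Int.floordiv_eq_ediv_of_pos (by omega)]
  rcases abs_cases ((gPair num_list).1 - (gPair num_list).2) with ⟨h1, h2⟩ | ⟨h1, h2⟩ <;>
    rw [h1] <;> omega
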